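-- pv_equiv track=rewrite | github.com/jejbr84/advent-of-code-2024 | day07-part2.py | calculate
-- ===== SOURCE A (Python) =====
-- def calculate(number, try_index):
--     if len(number) == 1:
--         return number[0]
--     elif try_index % 2 == 0:
--         # Addition
--         new_number = number[1:]
--         new_number[0] = number[0] + number[1]
--         return calculate(new_number, try_index // 2)
--     else:
--         # Multiplication
--         new_number = number[1:]
--         new_number[0] = number[0] * number[1]
--         return calculate(new_number, try_index // 2)
-- ===== SOURCE B (Python) =====
-- def calculate(number, try_index):
--     acc = number[0]
--     t = try_index
--     for x in number[1:]:
--         if t % 2 == 0: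
--             acc = acc + x
--         else:
--             acc = acc * x
--         t //= 2
--     return acc
-- ===== Notes on version B (the rewrite author's own statement) =====
-- stated objective: faster
-- what changed: Replaced the recursion that copies the list tail with number[1:] at every step by a single left-to-right loop over number[1:] with an accumulator, shifting try_index with //=2 each step.
import Mathlib
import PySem

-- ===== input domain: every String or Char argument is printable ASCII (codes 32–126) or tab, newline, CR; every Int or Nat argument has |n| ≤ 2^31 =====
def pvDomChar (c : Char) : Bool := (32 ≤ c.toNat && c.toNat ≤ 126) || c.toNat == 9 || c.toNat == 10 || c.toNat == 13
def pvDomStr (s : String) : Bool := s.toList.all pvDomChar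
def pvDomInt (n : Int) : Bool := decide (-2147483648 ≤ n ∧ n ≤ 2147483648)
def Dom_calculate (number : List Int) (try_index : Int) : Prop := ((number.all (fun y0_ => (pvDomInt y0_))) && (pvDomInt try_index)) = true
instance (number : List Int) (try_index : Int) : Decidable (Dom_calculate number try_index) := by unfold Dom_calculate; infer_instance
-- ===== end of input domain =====

-- B replaces A's recursion (which re-slices the list each step, O(n^2)) by one
-- left-to-right accumulator loop testing the bits of try_index (O(n)).


-- ===== PORT A =====
-- A raises IndexError on an empty list (number[0]); that case is excluded by Pre_ below,
-- the [] branch here is a dummy value outside the claim.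
def calculate : List Int → Int → Int
  | [], _ => 0
  | [a], _ => a
  | a :: b :: rest, t =>
    if PySem.Int.mod t 2 = 0 then
      calculate ((a + b) :: rest) (PySem.Int.floordiv t 2)
    else
      calculate ((a * b) :: rest) (PySem.Int.floordiv t 2)
termination_by n _ => n.length
decreasing_by all_goals simp

-- ===== PORT B =====
-- the for-loop over number[1:] with accumulator acc and shifting t
def calcLoop (acc : Int) (t : Int) : List Int → Int
  | [] => acc
  | x :: xs =>
    calcLoop (if PySem.Int.mod t 2 = 0 then acc + x else acc * x) (PySem.Int.floordiv t 2) xs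

def calculate_alt (number : List Int) (try_index : Int) : Int :=
  match number with
  | [] => 0   -- B's Python raises IndexError here; outside Pre_
  | a :: rest => calcLoop a try_index rest

-- ===== PRECONDITION & SPEC =====
-- Pre_ excludes only the empty list, on which both Pythons raise IndexError.
def Pre_calculate (number : List Int) (_try_index : Int) : Prop := number ≠ []
instance (number : List Int) (try_index : Int) : Decidable (Pre_calculate number try_index) := by unfold Pre_calculate; infer_instance

def pvWitness_calculate : List Int × Int := ([3, 5, 2], 6)

def Spec_calculate (number : List Int) (try_index : Int) (out : Int) : Prop := out = calculate_alt number try_index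
instance (number : List Int) (try_index : Int) (out : Int) : Decidable (Spec_calculate number try_index out) := by unfold Spec_calculate; infer_instance

-- ===== CLAIM (what is proved, stated in full; the proofs are below) =====
def Claim_equal_calculate : Prop := ∀ (number : List Int) (try_index : Int), Dom_calculate number try_index → Pre_calculate number try_index → Spec_calculate number try_index (calculate number try_index)

-- ===== LEMMAS AND PROOFS =====
theorem calculate_cons_eq_loop (rest : List Int) : ∀ (a t : Int),
    calculate (a :: rest) t = calcLoop a t rest := by
  induction rest with
  | nil => intro a t; simp [calculate, calcLoop]
  | cons b rs ih =>
    intro a t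
    simp only [calculate, calcLoop, ih]
    split <;> rfl

-- ===== VERDICT (by name: the statement is the Claim_ definition above) =====
theorem calculate_spec : Claim_equal_calculate := by
  intro number try_index _ hpre
  unfold Spec_calculate
  match number with
  | [] => exact absurd rfl hpre
  | a :: rest => simp [calculate_alt, calculate_cons_eq_loop]
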